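-- pv_equiv track=rewrite | github.com/zhulei1110/DouZero_AI_auto_play_for_HLDDZ | helpers/GameHelper.py | __get_actual_selected_cards_data
-- ===== SOURCE A (Python) =====
-- def __get_actual_selected_cards_data(initial_dict, after_selected_dict):
--     actual_selected_cards = []
--     actual_selected_cards_dict = {}
--
--     # 遍历初始的卡牌坐标字典
--     for card, positions in initial_dict.items():
--         # 遍历每一张卡牌的坐标（重复的卡牌对应多个坐标）
--         for i, (left, top) in enumerate(positions):
--             if card in after_selected_dict and i < len(after_selected_dict[card]):
--                 new_left, new_top = after_selected_dict[card][i]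
--                 # 没被选中的卡牌的top值 大于 选中后的卡牌的top值
--                 if top - new_top > 5:
--                     actual_selected_cards.append(card)
--                     if card not in actual_selected_cards_dict:
--                         actual_selected_cards_dict[card] = []
--                     actual_selected_cards_dict[card].append((new_left, new_top))
--
--     return actual_selected_cards, actual_selected_cards_dict
-- ===== SOURCE B (Python) =====
-- def __get_actual_selected_cards_data(initial_dict, after_selected_dict):
--     # Column-major traversal: instead of scanning each card's coordinate list in full
--     # (row-major) while accumulating both outputs, compare coordinate slot i of every
--     # card for i = 0, 1, ..., depth-1, collecting picks per card, then filter out the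
--     # cards with no picks and flatten.  Order is preserved because a card's picks stay
--     # grouped under its key and keys keep initial_dict's order.
--     depth = 0
--     for card, positions in initial_dict.items():
--         depth = max(depth, min(len(positions), len(after_selected_dict.get(card, []))))
--
--     picks = {card: [] for card in initial_dict}
--     for i in range(depth):
--         for card, positions in initial_dict.items():
--             after = after_selected_dict.get(card, [])
--             if i < len(positions) and i < len(after) and positions[i][1] - after[i][1] > 5:
--                 picks[card].append(after[i])
--
--     actual_selected_cards_dict = {card: ps for card, ps in picks.items() if ps}
--     actual_selected_cards = [card for card, ps in actual_selected_cards_dict.items() for _ in ps]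
--     return actual_selected_cards, actual_selected_cards_dict
-- ===== Notes on version B (the rewrite author's own statement) =====
-- stated objective: alternative
-- what changed: B transposes the traversal: it first computes the common depth, then scans coordinate slot i of EVERY card for i = 0..depth-1 (column-major) into a per-card picks table initialised for all cards, and finally filters out pickless cards and flattens, instead of A's row-major nested loop that walks each card's whole coordinate list while accumulating both outputs at once.
import Mathlib
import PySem

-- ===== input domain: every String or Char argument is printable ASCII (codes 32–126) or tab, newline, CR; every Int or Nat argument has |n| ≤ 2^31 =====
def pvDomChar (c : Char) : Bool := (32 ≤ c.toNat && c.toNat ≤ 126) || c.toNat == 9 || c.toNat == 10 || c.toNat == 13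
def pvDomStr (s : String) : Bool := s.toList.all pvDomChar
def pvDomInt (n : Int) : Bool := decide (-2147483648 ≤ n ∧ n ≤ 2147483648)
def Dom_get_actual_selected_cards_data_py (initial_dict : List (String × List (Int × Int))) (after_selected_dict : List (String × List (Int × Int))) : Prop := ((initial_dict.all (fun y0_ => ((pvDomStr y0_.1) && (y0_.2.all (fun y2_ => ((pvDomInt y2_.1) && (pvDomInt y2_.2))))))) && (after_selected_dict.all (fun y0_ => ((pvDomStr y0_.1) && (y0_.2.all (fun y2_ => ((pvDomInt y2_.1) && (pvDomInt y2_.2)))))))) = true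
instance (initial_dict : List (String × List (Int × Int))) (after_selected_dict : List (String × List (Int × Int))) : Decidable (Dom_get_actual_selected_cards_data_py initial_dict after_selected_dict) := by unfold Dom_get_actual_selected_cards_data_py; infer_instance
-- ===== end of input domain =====

-- B traverses the data column-major (coordinate slot i of every card, for i = 0..depth-1) into a
-- per-card picks table, then filters and flattens, instead of A's row-major accumulation of both
-- outputs in one nested loop.  Objective: alternative traversal; no speed claim.

-- ===== PORT A =====
-- one update of actual_selected_cards_dict: 'if card not in dict: dict[card] = []' then append
def pvAUpd (c : String) (d : PySem.Dict String (List (Int × Int))) (q : Int × Int) :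
    PySem.Dict String (List (Int × Int)) :=
  (if d.contains c then d else d.insert c []).modify c [] (fun l => l ++ [q])

-- one inner-loop step: 'card in after and i < len(after[card])' + indexing is pyGet? (none ↔ the
-- guard fails, since enumerate indices are ≥ 0), then the 'top - new_top > 5' branch
def pvAInner (after : PySem.Dict String (List (Int × Int))) (c : String)
    (acc : List String × PySem.Dict String (List (Int × Int))) (ip : Int × (Int × Int)) :
    List String × PySem.Dict String (List (Int × Int)) :=
  match after.get? c with
  | none => acc
  | some lst =>
    match PySem.List.pyGet? lst ip.1 with
    | none => acc
    | some q => if ip.2.2 - q.2 > 5 then (acc.1 ++ [c], pvAUpd c acc.2 q) else acc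

def get_actual_selected_cards_data_py (initial_dict : List (String × List (Int × Int))) (after_selected_dict : List (String × List (Int × Int))) : List String × (List (String × List (Int × Int))) :=
  let res := initial_dict.foldl
    (fun acc p => (PySem.List.enumerate p.2).foldl (pvAInner (PySem.Dict.mk after_selected_dict) p.1) acc)
    ([], PySem.Dict.empty)
  (res.1, res.2.items)

-- ===== PORT B =====
-- one step of B's inner (per-card) loop of the column pass for slot i:
-- 'if i < len(positions) and i < len(after) and positions[i][1] - after[i][1] > 5: picks[card].append(after[i])'
def pvColStep (after : PySem.Dict String (List (Int × Int))) (i : Int)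
    (d : PySem.Dict String (List (Int × Int))) (p : String × List (Int × Int)) :
    PySem.Dict String (List (Int × Int)) :=
  let al := after.getD p.1 []
  if i < PySem.List.len p.2 ∧ i < PySem.List.len al ∧
      (PySem.List.pyGetD p.2 i (0, 0)).2 - (PySem.List.pyGetD al i (0, 0)).2 > 5 then
    d.modify p.1 [] (fun l => l ++ [PySem.List.pyGetD al i (0, 0)])
  else d

def get_actual_selected_cards_data_py_alt (initial_dict : List (String × List (Int × Int))) (after_selected_dict : List (String × List (Int × Int))) : List String × (List (String × List (Int × Int))) :=
  let after := PySem.Dict.mk after_selected_dict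
  -- depth = max over cards of min(len(positions), len(after.get(card, [])))
  let depth := initial_dict.foldl
    (fun n p => max n (min (PySem.List.len p.2) (PySem.List.len (after.getD p.1 [])))) 0
  -- picks = {card: [] for card in initial_dict}
  let picks0 := initial_dict.foldl (fun d p => d.insert p.1 ([] : List (Int × Int))) PySem.Dict.empty
  -- for i in range(depth): for card, positions in initial_dict.items(): …
  let picks := (PySem.List.pyRange 0 depth 1).foldl
    (fun d i => initial_dict.foldl (pvColStep after i) d) picks0
  -- {card: ps for card, ps in picks.items() if ps}
  let resd := picks.items.foldl
    (fun d q => if q.2.isEmpty then d else d.insert q.1 q.2) PySem.Dict.empty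
  -- [card for card, ps in … .items() for _ in ps]
  (resd.items.flatMap (fun q => List.replicate q.2.length q.1), resd.items)

-- ===== PRECONDITION & SPEC =====
-- The inputs are association lists standing for Python dicts, whose keys are unique; Pre_ excludes
-- duplicate keys in initial_dict, where the order of the flat selected-cards list is an artefact of
-- the representation (no Python dict input reaches such a list).
def Pre_get_actual_selected_cards_data_py (initial_dict : List (String × List (Int × Int))) (after_selected_dict : List (String × List (Int × Int))) : Prop :=
  (initial_dict.map Prod.fst).Nodup
instance (initial_dict : List (String × List (Int × Int))) (after_selected_dict : List (String × List (Int × Int))) : Decidable (Pre_get_actual_selected_cards_data_py initial_dict after_selected_dict) := by unfold Pre_get_actual_selected_cards_data_py; infer_instance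

def pvWitness_get_actual_selected_cards_data_py : (List (String × List (Int × Int))) × (List (String × List (Int × Int))) :=
  ([("a", [(0, 10)])], [("a", [(0, 0)])])

def Spec_get_actual_selected_cards_data_py (initial_dict : List (String × List (Int × Int))) (after_selected_dict : List (String × List (Int × Int))) (out : List String × (List (String × List (Int × Int)))) : Prop := out = get_actual_selected_cards_data_py_alt initial_dict after_selected_dict
instance (initial_dict : List (String × List (Int × Int))) (after_selected_dict : List (String × List (Int × Int))) (out : List String × (List (String × List (Int × Int)))) : Decidable (Spec_get_actual_selected_cards_data_py initial_dict after_selected_dict out) := by unfold Spec_get_actual_selected_cards_data_py; infer_instance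

-- ===== CLAIM (what is proved, stated in full; the proofs are below) =====
def Claim_equal_get_actual_selected_cards_data_py : Prop := ∀ (initial_dict : List (String × List (Int × Int))) (after_selected_dict : List (String × List (Int × Int))), Dom_get_actual_selected_cards_data_py initial_dict after_selected_dict → Pre_get_actual_selected_cards_data_py initial_dict after_selected_dict → Spec_get_actual_selected_cards_data_py initial_dict after_selected_dict (get_actual_selected_cards_data_py initial_dict after_selected_dict)

-- ===== LEMMAS AND PROOFS =====

-- the picked coordinates of one card, as both programs produce them
def pvPk (ps ls : List (Int × Int)) : List (Int × Int) :=
  (ps.zip ls).filterMap (fun pr => if pr.1.2 - pr.2.2 > 5 then some pr.2 else none)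

-- the grouped dict both programs end with, as a plain filterMap over the entries
def pvBd (after : PySem.Dict String (List (Int × Int))) (rest : List (String × List (Int × Int))) :
    List (String × List (Int × Int)) :=
  rest.filterMap (fun p =>
    let pk := pvPk p.2 (after.getD p.1 [])
    if pk.isEmpty then none else some (p.1, pk))

-- what slot k contributes for one card (Nat-index form of pvColStep's guarded append)
def pvPickN (ps ls : List (Int × Int)) (k : Nat) : List (Int × Int) :=
  if k < ps.length ∧ k < ls.length ∧ (ps.getD k (0, 0)).2 - (ls.getD k (0, 0)).2 > 5
  then [ls.getD k (0, 0)] else []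

-- ---- A-side lemmas ----

-- folding pvAUpd over coords when the key is already present as 'e.insert c cur'
theorem pvAUpd_foldl_present (c : String) (coords : List (Int × Int)) :
    ∀ (cur : List (Int × Int)) (e : PySem.Dict String (List (Int × Int))),
      coords.foldl (pvAUpd c) (e.insert c cur) = e.insert c (cur ++ coords) := by
  induction coords with
  | nil => intro cur e; simp
  | cons x xs ih =>
    intro cur e
    have hstep : pvAUpd c (e.insert c cur) x = e.insert c (cur ++ [x]) := by
      unfold pvAUpd
      rw [if_pos (PySem.Dict.contains_insert_self e c cur), PySem.Dict.modify,
        PySem.Dict.getD_insert_self, PySem.Dict.insert_insert_self]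
    simp only [List.foldl_cons, hstep, ih]
    simp

-- folding pvAUpd over nonempty coords from a dict not containing c inserts (c, coords) fresh
theorem pvAUpd_foldl_fresh (c : String) (x : Int × Int) (xs : List (Int × Int))
    (d : PySem.Dict String (List (Int × Int))) (h : d.contains c = false) :
    (x :: xs).foldl (pvAUpd c) d = d.insert c (x :: xs) := by
  have hstep : pvAUpd c d x = d.insert c [x] := by
    unfold pvAUpd
    rw [if_neg (by simp [h]), PySem.Dict.modify, PySem.Dict.getD_insert_self,
      PySem.Dict.insert_insert_self]
    simp
  simp only [List.foldl_cons, hstep, pvAUpd_foldl_present]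
  simp

-- the inner enumerate-loop of A equals: append one card per picked coordinate, fold the updates
theorem pvAInner_foldl (after : PySem.Dict String (List (Int × Int))) (c : String)
    (ps : List (Int × Int)) :
    ∀ (k : Nat) (xs : List String) (d : PySem.Dict String (List (Int × Int))),
      (PySem.List.enumerate ps (k : Int)).foldl (pvAInner after c) (xs, d)
        = (xs ++ List.replicate (pvPk ps ((after.getD c []).drop k)).length c,
           (pvPk ps ((after.getD c []).drop k)).foldl (pvAUpd c) d) := by
  induction ps with
  | nil => intro k xs d; simp [PySem.List.enumerate_nil, pvPk]
  | cons p ps ih =>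
    intro k xs d
    rw [PySem.List.enumerate_cons]
    have hk1 : (k : Int) + 1 = ((k + 1 : Nat) : Int) := by push_cast; ring
    cases hget : after.get? c with
    | none =>
      have hgd : after.getD c [] = [] := PySem.Dict.getD_of_get?_eq_none after [] hget
      simp only [List.foldl_cons, pvAInner, hget, hk1, ih]
      simp [hgd, pvPk]
    | some lst =>
      have hgd : after.getD c [] = lst := PySem.Dict.getD_of_get?_eq_some after [] hget
      have hidx : PySem.List.pyGet? lst ((k : Int)) = lst[k]? := PySem.List.pyGet?_natCast lst k
      cases hlk : lst[k]? with
      | none =>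
        have hlen : lst.length ≤ k := List.getElem?_eq_none_iff.mp hlk
        have h1 : lst.drop k = [] := List.drop_eq_nil_of_le hlen
        have h2 : lst.drop (k + 1) = [] := List.drop_eq_nil_of_le (by omega)
        simp only [List.foldl_cons, pvAInner, hget, hidx, hlk, hk1, ih]
        simp [hgd, h1, h2, pvPk]
      | some q =>
        have hklen : k < lst.length := by
          by_contra hc
          rw [List.getElem?_eq_none_iff.2 (by omega)] at hlk
          simp at hlk
        have hq : lst[k] = q := by
          rw [List.getElem?_eq_getElem hklen] at hlk
          exact Option.some.inj hlk
        have hdrop : lst.drop k = q :: lst.drop (k + 1) := by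
          rw [← hq]; exact (List.getElem_cons_drop hklen).symm
        have hpk : pvPk (p :: ps) (lst.drop k)
            = if p.2 - q.2 > 5 then q :: pvPk ps (lst.drop (k + 1)) else pvPk ps (lst.drop (k + 1)) := by
          rw [hdrop]
          simp only [pvPk, List.zip_cons_cons, List.filterMap_cons]
          split_ifs <;> simp_all
        by_cases hcond : p.2 - q.2 > 5
        · simp only [List.foldl_cons, pvAInner, hget, hidx, hlk, if_pos hcond, hk1, ih]
          rw [hgd, hpk, if_pos hcond]
          simp [List.replicate_succ, List.append_assoc]
        · simp only [List.foldl_cons, pvAInner, hget, hidx, hlk, if_neg hcond, hk1, ih]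
          rw [hgd, hpk, if_neg hcond]

-- the outer loop of A: with fresh, distinct keys it appends the grouped entries and the flattening
theorem pvA_outer (after : PySem.Dict String (List (Int × Int))) :
    ∀ (rest : List (String × List (Int × Int))) (xs : List String)
      (d : PySem.Dict String (List (Int × Int))),
      (rest.map Prod.fst).Nodup → (∀ p ∈ rest, d.contains p.1 = false) →
      rest.foldl (fun acc p => (PySem.List.enumerate p.2).foldl (pvAInner after p.1) acc) (xs, d)
        = (xs ++ (pvBd after rest).flatMap (fun q => List.replicate q.2.length q.1),
           PySem.Dict.mk (d.items ++ pvBd after rest)) := by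
  intro rest
  induction rest with
  | nil =>
    intro xs d _ _
    simp [pvBd]
  | cons p rest ih =>
    intro xs d hnd hfresh
    have hnd' : (rest.map Prod.fst).Nodup := (List.nodup_cons.1 (by simpa using hnd)).2
    have hpnot : p.1 ∉ rest.map Prod.fst := (List.nodup_cons.1 (by simpa using hnd)).1
    have hfp : d.contains p.1 = false := hfresh p (List.mem_cons_self ..)
    simp only [List.foldl_cons]
    have hinner := pvAInner_foldl after p.1 p.2 0 xs d
    simp only [Int.natCast_zero] at hinner
    rw [hinner, List.drop_zero]
    cases hpk : pvPk p.2 (after.getD p.1 []) with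
    | nil =>
      have hbd : pvBd after (p :: rest) = pvBd after rest := by
        simp [pvBd, hpk]
      simp only [List.foldl_nil, List.length_nil, List.replicate_zero, List.append_nil]
      rw [ih xs d hnd' (fun q hq => hfresh q (List.mem_cons_of_mem _ hq)), hbd]
    | cons x xsq =>
      have hbd : pvBd after (p :: rest) = (p.1, x :: xsq) :: pvBd after rest := by
        simp [pvBd, hpk]
      rw [pvAUpd_foldl_fresh p.1 x xsq d hfp]
      have hitems : (d.insert p.1 (x :: xsq)).items = d.items ++ [(p.1, x :: xsq)] :=
        PySem.Dict.items_insert_of_not_contains d _ hfp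
      have hfresh' : ∀ q ∈ rest, (d.insert p.1 (x :: xsq)).contains q.1 = false := by
        intro q hq
        rw [PySem.Dict.contains_insert]
        have : q.1 ≠ p.1 := by
          intro he; exact hpnot (he ▸ List.mem_map_of_mem hq)
        simp [this, hfresh q (List.mem_cons_of_mem _ hq)]
      rw [ih _ _ hnd' hfresh', hbd, hitems]
      simp [List.append_assoc]

-- ---- B-side lemmas ----

-- bridge: pvColStep at a cast Nat index either leaves d alone or appends pvPickN's element
theorem pvColStep_natCast (after : PySem.Dict String (List (Int × Int))) (k : Nat)
    (d : PySem.Dict String (List (Int × Int))) (p : String × List (Int × Int)) :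
    pvColStep after (k : Int) d p
      = if (pvPickN p.2 (after.getD p.1 []) k).isEmpty then d
        else d.modify p.1 [] (fun l => l ++ pvPickN p.2 (after.getD p.1 []) k) := by
  unfold pvColStep pvPickN
  simp only [PySem.List.len_eq, PySem.List.pyGetD_natCast]
  by_cases h1 : k < p.2.length ∧ k < (after.getD p.1 []).length ∧
      ((p.2.getD k (0, 0)).2 - ((after.getD p.1 []).getD k (0, 0)).2 > 5)
  · rw [if_pos (show ((k : Int) < (p.2.length : Int) ∧ (k : Int) < ((after.getD p.1 []).length : Int) ∧
        (p.2.getD k (0, 0)).2 - ((after.getD p.1 []).getD k (0, 0)).2 > 5) from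
        ⟨by exact_mod_cast h1.1, by exact_mod_cast h1.2.1, h1.2.2⟩), if_pos h1]
    simp
  · rw [if_neg (fun hc => h1 ⟨by exact_mod_cast hc.1, by exact_mod_cast hc.2.1, hc.2.2⟩),
      if_neg h1]
    simp

-- one column pass over entries with distinct keys appends that slot's pick to every entry
theorem pvCol_pass (after : PySem.Dict String (List (Int × Int))) (k : Nat)
    (g : (String × List (Int × Int)) → List (Int × Int)) :
    ∀ (rest pre : List (String × List (Int × Int))),
      (pre.map Prod.fst ++ rest.map Prod.fst).Nodup →
      rest.foldl (pvColStep after (k : Int))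
          (PySem.Dict.mk (pre ++ rest.map (fun p => (p.1, g p))))
        = PySem.Dict.mk (pre ++ rest.map
            (fun p => (p.1, g p ++ pvPickN p.2 (after.getD p.1 []) k))) := by
  intro rest
  induction rest with
  | nil => intro pre _; simp
  | cons p rest ih =>
    intro pre hnd
    have hppre : p.1 ∉ pre.map Prod.fst := by
      intro h
      exact (List.disjoint_of_nodup_append hnd) h (by simp)
    have hprest : p.1 ∉ rest.map Prod.fst := by
      have := List.Nodup.of_append_right hnd
      exact (List.nodup_cons.1 (by simpa using this)).1
    have hnd' : ((pre ++ [(p.1, g p ++ pvPickN p.2 (after.getD p.1 []) k)]).map Prod.fst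
        ++ rest.map Prod.fst).Nodup := by
      simp only [List.map_append, List.map_cons, List.map_nil] at hnd ⊢
      simpa [List.append_assoc] using hnd
    have hmem : (p.1, g p)
        ∈ (PySem.Dict.mk (pre ++ (p.1, g p) :: rest.map (fun p => (p.1, g p)))).items := by
      simp
    have hkeysnd : (PySem.Dict.mk (pre ++ (p.1, g p) :: rest.map (fun p => (p.1, g p)))).keys.Nodup := by
      simpa [PySem.Dict.keys, Function.comp] using hnd
    have hget : (PySem.Dict.mk (pre ++ (p.1, g p) :: rest.map (fun p => (p.1, g p)))).get? p.1
        = some (g p) :=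
      PySem.Dict.get?_of_mem_items _ hmem hkeysnd
    have hcont : (PySem.Dict.mk (pre ++ (p.1, g p) :: rest.map (fun p => (p.1, g p)))).contains p.1
        = true := by
      rw [PySem.Dict.contains_eq_isSome_get?, hget]; rfl
    have hstep : pvColStep after (k : Int)
        (PySem.Dict.mk (pre ++ (p.1, g p) :: rest.map (fun p => (p.1, g p)))) p
        = PySem.Dict.mk (pre ++ (p.1, g p ++ pvPickN p.2 (after.getD p.1 []) k)
            :: rest.map (fun p => (p.1, g p))) := by
      rw [pvColStep_natCast]
      cases hpick : (pvPickN p.2 (after.getD p.1 []) k).isEmpty with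
      | true =>
        rw [if_pos rfl]
        have hnilpick : pvPickN p.2 (after.getD p.1 []) k = [] := by
          simpa using hpick
        rw [hnilpick]
        simp
      | false =>
        rw [if_neg (by simp)]
        rw [PySem.Dict.modify, PySem.Dict.getD_eq_get?_getD, hget]
        apply PySem.Dict.ext
        rw [PySem.Dict.items_insert_of_contains _ _ hcont]
        show List.map _ (pre ++ (p.1, g p) :: rest.map (fun p => (p.1, g p)))
          = pre ++ (p.1, g p ++ pvPickN p.2 (after.getD p.1 []) k) :: rest.map (fun p => (p.1, g p))
        rw [List.map_append, List.map_cons]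
        have h1 : pre.map (fun q => if (q.1 == p.1) = true
              then (p.1, (some (g p)).getD [] ++ pvPickN p.2 (after.getD p.1 []) k) else q)
            = pre.map id := by
          apply List.map_congr_left
          intro q hq
          have hne : (q.1 == p.1) = false := by
            simp only [beq_eq_false_iff_ne, ne_eq]
            intro he; exact hppre (he ▸ List.mem_map_of_mem hq)
          simp [hne]
        have h3 : (rest.map (fun p => (p.1, g p))).map (fun q => if (q.1 == p.1) = true
              then (p.1, (some (g p)).getD [] ++ pvPickN p.2 (after.getD p.1 []) k) else q)
            = (rest.map (fun p => (p.1, g p))).map id := by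
          apply List.map_congr_left
          intro q hq
          have hne : (q.1 == p.1) = false := by
            simp only [beq_eq_false_iff_ne, ne_eq]
            obtain ⟨r, hr, rfl⟩ := List.mem_map.1 hq
            intro he
            refine hprest ?_
            have hre : r.1 = p.1 := he
            rw [← hre]
            exact List.mem_map_of_mem (f := Prod.fst) hr
          simp [hne]
        rw [h1, h3]
        simp
    simp only [List.map_cons, List.foldl_cons]
    rw [hstep]
    have := ih (pre ++ [(p.1, g p ++ pvPickN p.2 (after.getD p.1 []) k)]) hnd'
    simpa [List.append_assoc] using this

-- the whole column loop: after n passes every entry holds the flatMap of its first n slot-picks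
theorem pvCol_loop (after : PySem.Dict String (List (Int × Int)))
    (init : List (String × List (Int × Int))) (hnd : (init.map Prod.fst).Nodup) :
    ∀ (n : Nat),
      (List.map (fun k : Nat => (k : Int)) (List.range n)).foldl
          (fun d i => init.foldl (pvColStep after i) d)
          (PySem.Dict.mk (init.map (fun p => (p.1, ([] : List (Int × Int))))))
        = PySem.Dict.mk (init.map (fun p =>
            (p.1, (List.range n).flatMap (pvPickN p.2 (after.getD p.1 []))))) := by
  intro n
  induction n with
  | zero => simp
  | succ n ih =>
    rw [List.range_succ, List.map_append, List.foldl_append, ih]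
    simp only [List.map_cons, List.map_nil, List.foldl_cons, List.foldl_nil]
    have hpass := pvCol_pass after n
      (fun p => (List.range n).flatMap (pvPickN p.2 (after.getD p.1 []))) init []
    simp only [List.nil_append, List.map_nil] at hpass
    rw [hpass (by simpa using hnd)]
    congr 1
    apply List.map_congr_left
    intro p _
    simp [List.flatMap_append]

-- once n covers min(len ps, len ls), the collected slot-picks are exactly pvPk
theorem pvPickN_flatMap_range (ps : List (Int × Int)) :
    ∀ (ls : List (Int × Int)) (n : Nat), min ps.length ls.length ≤ n →
      (List.range n).flatMap (pvPickN ps ls) = pvPk ps ls := by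
  induction ps with
  | nil =>
    intro ls n _
    have hh : ∀ k, pvPickN [] ls k = [] := by intro k; simp [pvPickN]
    simp [pvPk, List.flatMap_def, hh]
  | cons x ps ih =>
    intro ls n hn
    cases ls with
    | nil =>
      have hh : ∀ k, pvPickN (x :: ps) [] k = [] := by intro k; simp [pvPickN]
      simp [pvPk, List.flatMap_def, hh]
    | cons y ls =>
      cases n with
      | zero => simp only [List.length_cons] at hn; omega
      | succ n =>
        have hshift : ∀ k : Nat, pvPickN (x :: ps) (y :: ls) (k + 1) = pvPickN ps ls k := by
          intro k
          simp only [pvPickN, List.length_cons, List.getD_cons_succ]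
          congr 1
          simp only [eq_iff_iff]
          omega
        have h0 : pvPickN (x :: ps) (y :: ls) 0
            = if x.2 - y.2 > 5 then [y] else [] := by
          simp only [pvPickN, List.length_cons, List.getD_cons_zero]
          by_cases h2 : x.2 - y.2 > 5
          · rw [if_pos ⟨by omega, by omega, h2⟩, if_pos h2]
          · rw [if_neg (fun hc => h2 hc.2.2), if_neg h2]
        have hpk : pvPk (x :: ps) (y :: ls)
            = (if x.2 - y.2 > 5 then [y] else []) ++ pvPk ps ls := by
          simp only [pvPk, List.zip_cons_cons, List.filterMap_cons]
          split_ifs <;> simp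
        rw [List.range_succ_eq_map, List.flatMap_cons, h0, hpk, List.flatMap_map]
        congr 1
        exact (List.flatMap_congr (fun k _ => hshift k)).trans
          (ih ls n (by simp only [List.length_cons] at hn; omega))

-- the initialisation loop '{card: [] for card in initial_dict}' with distinct keys
theorem pvPicks0 (init : List (String × List (Int × Int))) (hnd : (init.map Prod.fst).Nodup) :
    init.foldl (fun d p => d.insert p.1 ([] : List (Int × Int))) PySem.Dict.empty
      = PySem.Dict.mk (init.map (fun p => (p.1, ([] : List (Int × Int))))) := by
  apply PySem.Dict.ext
  rw [PySem.Dict.items_foldl_insert_fresh init (fun p => p.1) (fun _ => []) PySem.Dict.empty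
    (fun a _ => PySem.Dict.contains_empty a.1) (by simpa using hnd)]
  simp [PySem.Dict.empty]

-- fold-max bound: the computed depth dominates each card's min length (and 0)
theorem pvDepth_bound (f : (String × List (Int × Int)) → Int)
    (l : List (String × List (Int × Int))) :
    0 ≤ l.foldl (fun n p => max n (f p)) 0 ∧
      ∀ p ∈ l, f p ≤ l.foldl (fun n p => max n (f p)) 0 := by
  have h := PySem.List.le_foldl_max (l.map f) 0
  rw [List.foldl_map] at h
  exact ⟨h.1, fun p hp => h.2 (f p) (List.mem_map_of_mem hp)⟩

-- the final dict comprehension: fold of guarded inserts over fresh distinct keys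
theorem pvResd (l : List (String × List (Int × Int))) :
    ∀ (d : PySem.Dict String (List (Int × Int))),
      (l.map Prod.fst).Nodup → (∀ q ∈ l, d.contains q.1 = false) →
      (l.foldl (fun d q => if q.2.isEmpty then d else d.insert q.1 q.2) d).items
        = d.items ++ l.filter (fun q => !q.2.isEmpty) := by
  induction l with
  | nil => intro d _ _; simp
  | cons q l ih =>
    intro d hnd hfresh
    have hnd' : (l.map Prod.fst).Nodup := (List.nodup_cons.1 (by simpa using hnd)).2
    have hqnot : q.1 ∉ l.map Prod.fst := (List.nodup_cons.1 (by simpa using hnd)).1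
    cases he : q.2.isEmpty with
    | true =>
      rw [List.foldl_cons, if_pos he, ih d hnd' (fun r hr => hfresh r (List.mem_cons_of_mem _ hr))]
      simp [he]
    | false =>
      rw [List.foldl_cons, if_neg (by simp [he])]
      have hfq : d.contains q.1 = false := hfresh q (List.mem_cons_self ..)
      have hfresh' : ∀ r ∈ l, (d.insert q.1 q.2).contains r.1 = false := by
        intro r hr
        rw [PySem.Dict.contains_insert]
        have hne : r.1 ≠ q.1 := by
          intro hh; exact hqnot (hh ▸ List.mem_map_of_mem hr)
        simp [hne, hfresh r (List.mem_cons_of_mem _ hr)]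
      rw [ih _ hnd' hfresh', PySem.Dict.items_insert_of_not_contains d _ hfq]
      simp [he, List.append_assoc]

-- pvBd is the nonempty-filter of the per-card pvPk entries
theorem pvBd_eq_filter (after : PySem.Dict String (List (Int × Int)))
    (init : List (String × List (Int × Int))) :
    (init.map (fun p => (p.1, pvPk p.2 (after.getD p.1 [])))).filter (fun q => !q.2.isEmpty)
      = pvBd after init := by
  induction init with
  | nil => simp [pvBd]
  | cons p init ih =>
    by_cases he : pvPk p.2 (after.getD p.1 []) = []
    · simp only [List.map_cons, List.filter_cons, pvBd, List.filterMap_cons] at ih ⊢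
      simp [he, ih]
    · simp only [List.map_cons, List.filter_cons, pvBd, List.filterMap_cons] at ih ⊢
      simp [he, ih, List.isEmpty_iff]

-- B computes the same pair in closed form
theorem pvB_eq (init after : List (String × List (Int × Int)))
    (hpre : (init.map Prod.fst).Nodup) :
    get_actual_selected_cards_data_py_alt init after
      = ((pvBd (PySem.Dict.mk after) init).flatMap (fun q => List.replicate q.2.length q.1),
         pvBd (PySem.Dict.mk after) init) := by
  unfold get_actual_selected_cards_data_py_alt
  simp only []
  set ad := PySem.Dict.mk after with had
  set dep := init.foldl (fun n p => max n (min (PySem.List.len p.2) (PySem.List.len (ad.getD p.1 [])))) 0 with hdep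
  have hb := pvDepth_bound (fun p => min (PySem.List.len p.2) (PySem.List.len (ad.getD p.1 []))) init
  have hd0 : 0 ≤ dep := hb.1
  have hr : PySem.List.pyRange 0 dep 1 = List.map (fun k : Nat => (k : Int)) (List.range dep.toNat) := by
    rw [← Int.toNat_of_nonneg hd0]
    exact PySem.List.pyRange_zero_natCast dep.toNat
  rw [pvPicks0 init hpre, hr, pvCol_loop ad init hpre dep.toNat]
  have hmap : init.map (fun p => (p.1, (List.range dep.toNat).flatMap (pvPickN p.2 (ad.getD p.1 []))))
      = init.map (fun p => (p.1, pvPk p.2 (ad.getD p.1 []))) := by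
    apply List.map_congr_left
    intro p hp
    have hle : min (PySem.List.len p.2) (PySem.List.len (ad.getD p.1 [])) ≤ dep := hb.2 p hp
    simp only [PySem.List.len_eq] at hle
    have hlen : min p.2.length (ad.getD p.1 []).length ≤ dep.toNat := by omega
    rw [pvPickN_flatMap_range p.2 (ad.getD p.1 []) dep.toNat hlen]
  rw [hmap]
  have hresd := pvResd (init.map (fun p => (p.1, pvPk p.2 (ad.getD p.1 []))))
    PySem.Dict.empty (by simpa [Function.comp] using hpre)
    (fun q _ => PySem.Dict.contains_empty q.1)
  rw [show (PySem.Dict.mk (init.map (fun p => (p.1, pvPk p.2 (ad.getD p.1 []))))).items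
      = init.map (fun p => (p.1, pvPk p.2 (ad.getD p.1 []))) from rfl] at *
  rw [hresd, pvBd_eq_filter]
  simp [PySem.Dict.empty]

-- ===== VERDICT (by name: the statement is the Claim_ definition above) =====
theorem get_actual_selected_cards_data_py_spec : Claim_equal_get_actual_selected_cards_data_py := by
  intro init after _ hpre
  unfold Spec_get_actual_selected_cards_data_py
  unfold get_actual_selected_cards_data_py
  rw [pvB_eq init after hpre]
  have hfresh : ∀ p ∈ init, (PySem.Dict.empty : PySem.Dict String (List (Int × Int))).contains p.1 = false := by
    intro p _; exact PySem.Dict.contains_empty p.1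
  rw [pvA_outer (PySem.Dict.mk after) init [] PySem.Dict.empty hpre hfresh]
  simp [PySem.Dict.empty]
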